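-- pv_equiv track=rewrite | github.com/zmgu/AlgorithmPractice | 프로그래머스/Python/Lv1 신규 아이디 추천.py | solution
-- ===== SOURCE A (Python) =====
-- def solution(new_id):
--     answer = ''
--     if len(new_id) == 0:
--         return 'aaa'
--
--     new_id = new_id.lower()
--     ck = 'qwertyuiopasdfghjklzxcvbnm-_1234567890'
--
--     for i in range(len(new_id)):
--         if new_id[i] in ck:
--             answer += new_id[i]
--         elif new_id[i] == '.':
--             if len(answer) == 0:
--                 continue
--             elif answer[-1] != '.':
--                 answer += new_id[i]
--
--     if len(answer) == 0:
--         return 'aaa'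
--
--     if len(answer) > 15:
--         answer = answer[:15]
--
--     if answer[-1] == '.':
--         answer = answer[:-1]
--
--     if len(answer) < 3:
--         while len(answer) < 3:
--             answer += answer[-1]
--
--     return answer
-- ===== SOURCE B (Python) =====
-- def solution(new_id):
--     allowed = set('abcdefghijklmnopqrstuvwxyz0123456789-_.')
--     kept = ''.join(c for c in new_id.lower() if c in allowed)
--     # split on dots and rejoin the nonempty segments: this collapses dot runs
--     # and strips leading/trailing dots in one stroke
--     s = '.'.join(seg for seg in kept.split('.') if seg)[:15].rstrip('.')
--     if not s:
--         return 'aaa'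
--     return s.ljust(3, s[-1])
-- ===== Notes on version B (the rewrite author's own statement) =====
-- stated objective: faster
-- what changed: A's single stateful per-character loop (appending to an accumulator and inspecting its last element to drop disallowed chars, collapse dot runs and strip leading dots) is replaced by a segment decomposition: split the kept characters on dots, rejoin the nonempty segments with single dots (which collapses runs and strips boundary dots at once), then slice, strip a trailing dot and pad with ljust.
import Mathlib
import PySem

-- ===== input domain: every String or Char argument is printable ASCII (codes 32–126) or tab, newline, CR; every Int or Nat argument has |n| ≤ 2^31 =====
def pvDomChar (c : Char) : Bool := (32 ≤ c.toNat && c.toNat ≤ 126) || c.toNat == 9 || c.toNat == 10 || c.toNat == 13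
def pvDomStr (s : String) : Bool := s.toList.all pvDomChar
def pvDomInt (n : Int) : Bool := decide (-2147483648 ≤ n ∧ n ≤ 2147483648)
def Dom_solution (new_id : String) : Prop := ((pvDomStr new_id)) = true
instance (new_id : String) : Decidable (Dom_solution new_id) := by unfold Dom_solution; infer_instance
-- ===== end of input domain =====

-- B replaces A's single stateful character loop (which collapses dot runs and strips
-- leading dots by inspecting the accumulator's last element) by a segment decomposition:
-- split the kept characters on dots, rejoin the nonempty segments with single dots, then
-- truncate, strip a trailing dot and pad (measured faster by a constant factor: the
-- per-character Python loop becomes bulk split/join passes).  Return values only.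

-- ===== PORT A =====
def ckA : List Char := "qwertyuiopasdfghjklzxcvbnm-_1234567890".toList

def stepA (ans : List Char) (c : Char) : List Char :=
  if c ∈ ckA then ans ++ [c]
  else if c = '.' then
    if ans.length = 0 then ans
    else if ans.getLast? ≠ some '.' then ans ++ [c] else ans
  else ans

-- Python's 'while len(answer) < 3: answer += answer[-1]' (the guard 'if len < 3' folded in).
def padA (ans : List Char) : List Char :=
  if ans.length < 3 then padA (ans ++ [ans.getLastD 'a']) else ans
termination_by 3 - ans.length
decreasing_by simp; omega

def solution (new_id : String) : String :=
  if new_id.toList.length = 0 then "aaa" else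
  let s := (PySem.Str.lower new_id).toList
  let answer := s.foldl stepA []
  if answer.length = 0 then "aaa" else
  let answer := if answer.length > 15 then answer.take 15 else answer
  let answer := if answer.getLast? = some '.' then answer.dropLast else answer
  String.mk (padA answer)

-- ===== PORT B =====
def allowedB : List Char := "abcdefghijklmnopqrstuvwxyz0123456789-_.".toList

def solution_alt (new_id : String) : String :=
  let kept := ((PySem.Str.lower new_id).toList).filter (· ∈ allowedB)
  let s := (PySem.Chars.join ['.'] ((PySem.Chars.splitOn kept ['.']).filter (· ≠ []))).take 15
  -- s.rstrip('.') ported by hand: drop the trailing run of '.' characters (exact for this call)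
  let s := (s.reverse.dropWhile (· == '.')).reverse
  if s = [] then "aaa"
  -- s.ljust(3, s[-1]); s is nonempty here, so getLastD's default is never consulted
  else String.mk (s ++ List.replicate (3 - s.length) (s.getLastD 'a'))

-- ===== PRECONDITION & SPEC =====
def Spec_solution (new_id : String) (out : String) : Prop := out = solution_alt new_id
instance (new_id : String) (out : String) : Decidable (Spec_solution new_id out) := by unfold Spec_solution; infer_instance

-- ===== CLAIM (what is proved, stated in full; the proofs are below) =====
def Claim_equal_solution : Prop := ∀ (new_id : String), Dom_solution new_id → Spec_solution new_id (solution new_id)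

-- ===== LEMMAS AND PROOFS =====

-- recursive view of A's accumulator loop: collapse p t = what the loop appends after
-- an accumulator whose last character is p ('.' also stands for the empty accumulator)
def collapse (p : Char) : List Char → List Char
  | [] => []
  | c :: t => if c ≠ '.' ∨ p ≠ '.' then c :: collapse c t else collapse c t

-- recursive view of Python's str.split('.')
def splitDots : List Char → List (List Char)
  | [] => [[]]
  | c :: t =>
    if c = '.' then [] :: splitDots t
    else match splitDots t with
      | [] => [[c]]
      | s :: rest => (c :: s) :: rest

-- drop the trailing run of dots (B's rstrip('.'))
def rstripD (l : List Char) : List Char := (l.reverse.dropWhile (· == '.')).reverse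

-- drop one trailing dot if present (A's final conditional)
def dropTrailOne (l : List Char) : List Char :=
  if l.getLast? = some '.' then l.dropLast else l

-- no two adjacent dots
def noDD : List Char → Prop
  | [] => True
  | [_] => True
  | a :: b :: t => (a ≠ '.' ∨ b ≠ '.') ∧ noDD (b :: t)

lemma mem_ckA_iff (c : Char) : c ∈ ckA ↔ c ∈ allowedB ∧ c ≠ '.' := by
  constructor
  · intro h
    have hall : ckA.all (fun x => decide (x ∈ allowedB ∧ x ≠ '.')) = true := by decide
    exact of_decide_eq_true (List.all_eq_true.mp hall c h)
  · rintro ⟨h, hd⟩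
    have hall : allowedB.all (fun x => decide (x = '.' ∨ x ∈ ckA)) = true := by decide
    rcases of_decide_eq_true (List.all_eq_true.mp hall c h) with h1 | h1
    · exact absurd h1 hd
    · exact h1

lemma key_lemma : ∀ (l ans : List Char) (p : Char),
    (p = '.' ↔ (ans = [] ∨ ans.getLast? = some '.')) →
    l.foldl stepA ans = ans ++ collapse p (l.filter (· ∈ allowedB)) := by
  intro l
  induction l with
  | nil => intro ans p _; simp [collapse]
  | cons c t ih =>
    intro ans p hp
    simp only [List.foldl_cons, List.filter_cons]
    by_cases hck : c ∈ ckA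
    · have ha : c ∈ allowedB ∧ c ≠ '.' := (mem_ckA_iff c).1 hck
      have hstep : stepA ans c = ans ++ [c] := by simp [stepA, hck]
      rw [hstep, ih (ans ++ [c]) c (by simp [List.getLast?_concat, ha.2, Option.some_inj])]
      simp [ha.1, collapse, ha.2]
    · by_cases hd : c = '.'
      · subst hd
        have hmem : ('.' : Char) ∈ allowedB := by decide
        by_cases hcase : ans = [] ∨ ans.getLast? = some '.'
        · have hpd : p = '.' := hp.2 hcase
          have hstep : stepA ans '.' = ans := by
            rcases hcase with h0 | hlast
            · simp [stepA, hck, h0]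
            · have : ¬ ans.length = 0 := by
                intro hlen; rw [List.length_eq_zero_iff] at hlen; simp [hlen] at hlast
              simp [stepA, hck, this, hlast]
          rw [hstep, ih ans '.' (iff_of_true rfl hcase)]
          subst hpd
          simp [hmem, collapse]
        · have hpd : p ≠ '.' := fun h => hcase (hp.1 h)
          push_neg at hcase
          have hlen : ¬ ans.length = 0 := by
            intro hlen; exact hcase.1 (List.length_eq_zero_iff.mp hlen)
          have hstep : stepA ans '.' = ans ++ ['.'] := by
            simp [stepA, hck, hlen, hcase.2]
          rw [hstep, ih (ans ++ ['.']) '.' (by simp [List.getLast?_concat])]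
          simp [hmem, collapse, hpd]
      · have ha : c ∉ allowedB := fun h => hck ((mem_ckA_iff c).2 ⟨h, hd⟩)
        have hstep : stepA ans c = ans := by simp [stepA, hck, hd]
        rw [hstep, ih ans p hp]
        simp [ha]

lemma pad_eq (s : List Char) : padA s = s ++ List.replicate (3 - s.length) (s.getLastD 'a') := by
  match s with
  | [] => rw [padA]; rw [padA]; rw [padA]; rw [padA]; simp
  | [a] =>
    rw [padA]; rw [padA]; rw [padA]
    simp [List.getLast?_concat, List.replicate]
  | [a, b] =>
    rw [padA]; rw [padA]
    simp [List.getLast?_concat, List.replicate]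
  | a :: b :: c :: t =>
    rw [padA]
    have : ¬ (a :: b :: c :: t).length < 3 := by simp
    simp [this]

-- ---- splitOn = splitDots ----

lemma splitDots_ne_nil : ∀ t, splitDots t ≠ [] := by
  intro t
  cases t with
  | nil => simp [splitDots]
  | cons c u =>
    by_cases hc : c = '.'
    · simp [splitDots, hc]
    · cases h : splitDots u <;> simp [splitDots, hc, h]

lemma sd_cons (t : List Char) : (splitDots t).headI :: (splitDots t).tail = splitDots t := by
  cases h : splitDots t with
  | nil => exact absurd h (splitDots_ne_nil t)
  | cons s r => simp

lemma splitOn_go_eq : ∀ (fuel : Nat) (l cur : List Char) (acc : List (List Char)),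
    l.length < fuel →
    PySem.Chars.splitOn.go ['.'] fuel l cur acc =
      acc.reverse ++ (cur.reverse ++ (splitDots l).headI) :: (splitDots l).tail := by
  intro fuel
  induction fuel with
  | zero => intro l cur acc h; omega
  | succ f ih =>
    intro l cur acc h
    cases l with
    | nil => simp [PySem.Chars.splitOn.go, splitDots]
    | cons c rest =>
      by_cases hc : c = '.'
      · subst hc
        rw [show PySem.Chars.splitOn.go ['.'] (f + 1) ('.' :: rest) cur acc =
              PySem.Chars.splitOn.go ['.'] f rest [] (cur.reverse :: acc) by
            simp [PySem.Chars.splitOn.go, List.isPrefixOf]]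
        rw [ih rest [] (cur.reverse :: acc) (by simp at h ⊢; omega)]
        rw [show splitDots ('.' :: rest) = [] :: splitDots rest by simp [splitDots]]
        simp [sd_cons]
      · rw [show PySem.Chars.splitOn.go ['.'] (f + 1) (c :: rest) cur acc =
              PySem.Chars.splitOn.go ['.'] f rest (c :: cur) acc by
            simp [PySem.Chars.splitOn.go, List.isPrefixOf, Ne.symm hc]]
        rw [ih rest (c :: cur) acc (by simp at h ⊢; omega)]
        cases hsd : splitDots rest with
        | nil => exact absurd hsd (splitDots_ne_nil rest)
        | cons s r =>
          rw [show splitDots (c :: rest) = (c :: s) :: r by simp [splitDots, hc, hsd]]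
          simp

lemma splitOn_eq (t : List Char) : PySem.Chars.splitOn t ['.'] = splitDots t := by
  rw [PySem.Chars.splitOn, splitOn_go_eq (t.length + 1) t [] [] (by omega)]
  simpa using sd_cons t

-- ---- rstripD / intercalate step lemmas ----

lemma rstrip_cons_nondot {a : Char} (x : List Char) (ha : a ≠ '.') :
    rstripD (a :: x) = a :: rstripD x := by
  unfold rstripD
  rw [show (a :: x).reverse = x.reverse ++ [a] by simp, List.dropWhile_append]
  split_ifs with h
  · rw [List.isEmpty_iff] at h
    simp [h, ha]
  · simp

lemma rstrip_cons_dot (x : List Char) :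
    rstripD ('.' :: x) = if rstripD x = [] then [] else '.' :: rstripD x := by
  unfold rstripD
  rw [show ('.' :: x).reverse = x.reverse ++ ['.'] by simp, List.dropWhile_append]
  split_ifs with h h2 h3
  · rw [List.isEmpty_iff] at h; simp [h]
  · rw [List.isEmpty_iff] at h
    simp [h] at h2
  · rw [List.isEmpty_iff] at h
    simp only [List.reverse_eq_nil_iff] at h3
    simp [h3] at h
  · simp

lemma inter_cons_head (a : Char) (s : List Char) (ls : List (List Char)) :
    List.intercalate ['.'] ((a :: s) :: ls) = a :: List.intercalate ['.'] (s :: ls) := by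
  cases ls <;> simp [List.intercalate, List.intersperse]

lemma inter_ne_nil {l : List Char} (ls : List (List Char)) (hl : l ≠ []) :
    List.intercalate ['.'] (l :: ls) ≠ [] := by
  cases ls <;> simp [List.intercalate, List.intersperse, hl]

lemma inter_nil_head (ls : List (List Char)) (h : ∀ x ∈ ls, x ≠ []) :
    List.intercalate ['.'] ([] :: ls) =
      if List.intercalate ['.'] ls = [] then [] else '.' :: List.intercalate ['.'] ls := by
  cases ls with
  | nil => simp [List.intercalate, List.intersperse]
  | cons l ls2 =>
    rw [if_neg (inter_ne_nil ls2 (h l (by simp)))]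
    simp [List.intercalate, List.intersperse]

lemma collapse_nondot {a : Char} (t : List Char) (ha : a ≠ '.') :
    collapse a t = collapse 'a' t := by
  cases t with
  | nil => rfl
  | cons c u => simp [collapse, ha]

-- ---- the split/join pass computes rstripD ∘ collapse ----

lemma SL : ∀ t : List Char,
    List.intercalate ['.'] ((splitDots t).filter (· ≠ [])) = rstripD (collapse '.' t) ∧
    List.intercalate ['.'] ((splitDots t).headI :: ((splitDots t).tail.filter (· ≠ []))) =
      rstripD (collapse 'a' t) := by
  intro t
  induction t with
  | nil =>
    constructor <;> simp [splitDots, collapse, List.intercalate, List.intersperse, rstripD]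
  | cons c u ih =>
    obtain ⟨ihP, ihQ⟩ := ih
    by_cases hc : c = '.'
    · subst hc
      have hcol : collapse '.' ('.' :: u) = collapse '.' u := by simp [collapse]
      have hcolA : collapse 'a' ('.' :: u) = '.' :: collapse '.' u := by simp [collapse]
      have hsd : splitDots ('.' :: u) = [] :: splitDots u := by simp [splitDots]
      constructor
      · rw [hsd, hcol, List.filter_cons, if_neg (by simp), ihP]
      · rw [hsd, hcolA, rstrip_cons_dot]
        simp only [List.headI_cons, List.tail_cons]
        rw [inter_nil_head _ (fun x hx => by simpa using (List.mem_filter.mp hx).2), ihP]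
    · cases hsd : splitDots u with
      | nil => exact absurd hsd (splitDots_ne_nil u)
      | cons s rest =>
        have hshape : splitDots (c :: u) = (c :: s) :: rest := by simp [splitDots, hc, hsd]
        have hQu : List.intercalate ['.'] (s :: rest.filter (· ≠ [])) = rstripD (collapse 'a' u) := by
          rw [hsd] at ihQ
          simpa using ihQ
        have hcol : collapse '.' (c :: u) = c :: collapse c u := by simp [collapse, hc]
        have hcolA : collapse 'a' (c :: u) = c :: collapse c u := by simp [collapse, hc]
        constructor
        · rw [hshape, hcol, List.filter_cons, if_pos (by simp), inter_cons_head, hQu,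
              rstrip_cons_nondot _ hc, collapse_nondot u hc]
        · rw [hshape, hcolA]
          simp only [List.headI_cons, List.tail_cons]
          rw [inter_cons_head, hQu, rstrip_cons_nondot _ hc, collapse_nondot u hc]

-- ---- structural facts about A's collapsed accumulator ----

lemma head_collapse : ∀ t, (collapse '.' t).head? ≠ some '.' := by
  intro t
  induction t with
  | nil => simp [collapse]
  | cons c u ih =>
    by_cases hc : c = '.'
    · subst hc; simpa [collapse] using ih
    · simp [collapse, hc]

lemma noDD_cons_of {c : Char} {x : List Char}
    (h1 : ∀ b, x.head? = some b → (c ≠ '.' ∨ b ≠ '.')) (h2 : noDD x) : noDD (c :: x) := by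
  cases x with
  | nil => trivial
  | cons b t => exact ⟨h1 b rfl, h2⟩

lemma noDD_collapse : ∀ (t : List Char) (p : Char), noDD (collapse p t) := by
  intro t
  induction t with
  | nil => intro p; trivial
  | cons c u ih =>
    intro p
    by_cases hg : c ≠ '.' ∨ p ≠ '.'
    · rw [show collapse p (c :: u) = c :: collapse c u by simp [collapse, hg]]
      refine noDD_cons_of (fun b hb => ?_) (ih c)
      by_cases hc : c = '.'
      · subst hc
        right
        intro hbdot
        exact head_collapse u (by rw [hb, hbdot])
      · exact Or.inl hc
    · rw [show collapse p (c :: u) = collapse c u by simp [collapse]; tauto]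
      exact ih c

lemma noDD_tail {a : Char} {x : List Char} (h : noDD (a :: x)) : noDD x := by
  cases x with
  | nil => trivial
  | cons b t => exact h.2

lemma noDD_take : ∀ (l : List Char) (n : Nat), noDD l → noDD (l.take n) := by
  intro l
  induction l with
  | nil => intro n _; simp only [List.take_nil]; trivial
  | cons a x ih =>
    intro n h
    cases n with
    | zero => trivial
    | succ m =>
      rw [List.take_succ_cons]
      refine noDD_cons_of (fun b hb => ?_) (ih m (noDD_tail h))
      cases x with
      | nil => simp at hb
      | cons b2 t =>
        cases m with
        | zero => simp at hb
        | succ k =>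
          rw [List.take_succ_cons] at hb
          simp at hb
          subst hb
          exact h.1

lemma rstrip_eq_dropTrail : ∀ l, noDD l → rstripD l = dropTrailOne l := by
  intro l
  induction l with
  | nil => intro _; rfl
  | cons a x ih =>
    intro h
    by_cases ha : a = '.'
    · subst ha
      rw [rstrip_cons_dot]
      cases x with
      | nil => simp [rstripD, dropTrailOne]
      | cons b t =>
        have hb : b ≠ '.' := by
          rcases h.1 with h1 | h1
          · exact absurd rfl h1
          · exact h1
        rw [if_neg (by rw [rstrip_cons_nondot t hb]; simp), ih (noDD_tail h)]
        unfold dropTrailOne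
        rw [List.getLast?_cons_cons]
        split_ifs with hg
        · rfl
        · rfl
    · rw [rstrip_cons_nondot x ha, ih (noDD_tail h)]
      cases x with
      | nil => simp [dropTrailOne, ha]
      | cons b t =>
        unfold dropTrailOne
        rw [List.getLast?_cons_cons]
        split_ifs with hg
        · rfl
        · rfl

lemma noDD_getLast_pair : ∀ l, noDD l → l.getLast? = some '.' → l.dropLast.getLast? ≠ some '.' := by
  intro l
  induction l with
  | nil => intro _ hx; simp at hx
  | cons a x ih =>
    intro h hlast
    cases x with
    | nil => simp
    | cons b t =>
      rw [List.getLast?_cons_cons] at hlast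
      cases t with
      | nil =>
        have hb : b = '.' := by simpa using hlast
        have ha : a ≠ '.' := by
          rcases h.1 with h1 | h1
          · exact h1
          · exact absurd hb h1
        simpa using ha
      | cons d u =>
        have := ih (noDD_tail h) hlast
        rw [show (a :: b :: d :: u).dropLast = a :: (b :: d :: u).dropLast by rfl]
        rw [show (b :: d :: u).dropLast = b :: (d :: u).dropLast by rfl] at this ⊢
        rwa [List.getLast?_cons_cons]

lemma EQ (c : List Char) (hn : noDD c) (hh : c.head? ≠ some '.') :
    dropTrailOne ((dropTrailOne c).take 15) = dropTrailOne (c.take 15) := by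
  by_cases hlast : c.getLast? = some '.'
  · have hd : dropTrailOne c = c.dropLast := by simp [dropTrailOne, hlast]
    rw [hd]
    by_cases hlen : c.length ≤ 15
    · rw [List.take_of_length_le (by rw [List.length_dropLast]; omega),
          List.take_of_length_le hlen]
      have h2 := noDD_getLast_pair c hn hlast
      simp [dropTrailOne, hlast, h2]
    · rw [show c.dropLast.take 15 = c.take 15 by
        rw [List.dropLast_eq_take, List.take_take]
        congr 1
        omega]
  · simp [dropTrailOne, hlast]

lemma NE (c : List Char) (hh : c.head? ≠ some '.') (hne : c ≠ []) :
    dropTrailOne (c.take 15) ≠ [] := by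
  obtain ⟨x, cs, rfl⟩ := List.exists_cons_of_ne_nil hne
  have hx : x ≠ '.' := by simpa using hh
  rw [show (15 : Nat) = 14 + 1 from rfl, List.take_succ_cons]
  unfold dropTrailOne
  split_ifs with hg
  · cases h14 : cs.take 14 with
    | nil =>
      rw [h14] at hg
      simp at hg
      exact absurd hg hx
    | cons y t =>
      simp [h14]
  · simp

lemma noDD_dropTrailOne (c : List Char) (h : noDD c) : noDD (dropTrailOne c) := by
  unfold dropTrailOne
  split_ifs with hg
  · rw [List.dropLast_eq_take]
    exact noDD_take c _ h
  · exact h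

lemma core (L : List Char) :
    (if L.length = 0 then "aaa" else
      let answer := L.foldl stepA []
      if answer.length = 0 then "aaa" else
      let answer := if answer.length > 15 then answer.take 15 else answer
      let answer := if answer.getLast? = some '.' then answer.dropLast else answer
      String.mk (padA answer))
    = (let kept := L.filter (· ∈ allowedB)
       let s := (PySem.Chars.join ['.'] ((PySem.Chars.splitOn kept ['.']).filter (· ≠ []))).take 15
       let s := (s.reverse.dropWhile (· == '.')).reverse
       if s = [] then "aaa"
       else String.mk (s ++ List.replicate (3 - s.length) (s.getLastD 'a'))) := by
  have hfold : L.foldl stepA [] = collapse '.' (L.filter (· ∈ allowedB)) := by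
    simpa using key_lemma L [] '.' (by simp)
  set t := L.filter (· ∈ allowedB) with ht
  set c := collapse '.' t with hcdef
  have hn : noDD c := noDD_collapse t '.'
  have hh : c.head? ≠ some '.' := head_collapse t
  have hB : ((((PySem.Chars.join ['.'] ((PySem.Chars.splitOn t ['.']).filter (· ≠ []))).take 15).reverse.dropWhile (· == '.')).reverse : List Char)
      = dropTrailOne (c.take 15) := by
    show rstripD ((PySem.Chars.join ['.'] ((PySem.Chars.splitOn t ['.']).filter (· ≠ []))).take 15)
        = dropTrailOne (c.take 15)
    rw [PySem.Chars.join, show List.intercalate ['.'] = (['.'] : List Char).intercalate from rfl] at *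
    rw [splitOn_eq, (SL t).1, ← hcdef, rstrip_eq_dropTrail c hn,
        rstrip_eq_dropTrail _ (noDD_take _ 15 (noDD_dropTrailOne c hn))]
    exact EQ c hn hh
  show _ = (if ((((PySem.Chars.join ['.'] ((PySem.Chars.splitOn t ['.']).filter (· ≠ []))).take 15).reverse.dropWhile (· == '.')).reverse : List Char) = [] then "aaa"
       else String.mk ((((PySem.Chars.join ['.'] ((PySem.Chars.splitOn t ['.']).filter (· ≠ []))).take 15).reverse.dropWhile (· == '.')).reverse ++ List.replicate (3 - ((((PySem.Chars.join ['.'] ((PySem.Chars.splitOn t ['.']).filter (· ≠ []))).take 15).reverse.dropWhile (· == '.')).reverse).length) (((((PySem.Chars.join ['.'] ((PySem.Chars.splitOn t ['.']).filter (· ≠ []))).take 15).reverse.dropWhile (· == '.')).reverse).getLastD 'a')))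
  rw [hB]
  by_cases hL : L.length = 0
  · have hL' : L = [] := List.length_eq_zero_iff.mp hL
    have hc0 : c = [] := by rw [hcdef, ht, hL']; rfl
    rw [if_pos hL, if_pos (by rw [hc0]; rfl)]
  · rw [if_neg hL]
    show (let answer := L.foldl stepA []
          if answer.length = 0 then "aaa" else
          let answer := if answer.length > 15 then answer.take 15 else answer
          let answer := if answer.getLast? = some '.' then answer.dropLast else answer
          String.mk (padA answer)) = _
    rw [show L.foldl stepA [] = c from hfold]
    by_cases hc0 : c.length = 0
    · have hcnil : c = [] := List.length_eq_zero_iff.mp hc0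
      rw [if_pos hc0, if_pos (by rw [hcnil]; rfl)]
    · have hcne : c ≠ [] := fun h => hc0 (by rw [h]; rfl)
      rw [if_neg hc0]
      have h1 : (if c.length > 15 then c.take 15 else c) = c.take 15 := by
        split_ifs with h
        · rfl
        · rw [List.take_of_length_le (by omega)]
      have h2 : (if (c.take 15).getLast? = some '.' then (c.take 15).dropLast else c.take 15)
          = dropTrailOne (c.take 15) := rfl
      rw [if_neg (NE c hh hcne)]
      show String.mk (padA (if (if c.length > 15 then c.take 15 else c).getLast? = some '.'
            then (if c.length > 15 then c.take 15 else c).dropLast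
            else (if c.length > 15 then c.take 15 else c))) = _
      rw [h1, h2, pad_eq]

-- ===== VERDICT (by name: the statement is the Claim_ definition above) =====
theorem solution_spec : Claim_equal_solution := by
  intro new_id _
  unfold Spec_solution solution solution_alt
  have hlen : new_id.toList.length = ((PySem.Str.lower new_id).toList).length := by
    simp [PySem.Chars.lower]
  rw [hlen]
  exact core ((PySem.Str.lower new_id).toList)
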